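-- pv_equiv track=rewrite | github.com/mat-sop/Advent_of_Code_2021 | day10/chunks.py | count_incomplete_scores
-- ===== SOURCE A (Python) =====
-- from typing import List, Optional
--
-- INCOMPLETE_SCORING = {
--     ")": 1,
--     "]": 2,
--     "}": 3,
--     ">": 4,
-- }
--
-- def count_incomplete_scores(missing_strings: List[str]) -> List[int]:
--     scores = []
--     for missing_string in missing_strings:
--         score = 0
--         for c in missing_string:
--             score *= 5
--             score += INCOMPLETE_SCORING[c]
--         scores.append(score)
--     return scores
-- ===== SOURCE B (Python) =====
-- from typing import List
--
-- INCOMPLETE_SCORING = {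
--     ")": 1,
--     "]": 2,
--     "}": 3,
--     ">": 4,
-- }
--
-- def count_incomplete_scores(missing_strings: List[str]) -> List[int]:
--     scores = []
--     for missing_string in missing_strings:
--         total = 0
--         weight = 1
--         for c in reversed(missing_string):
--             total += INCOMPLETE_SCORING[c] * weight
--             weight *= 5
--         scores.append(total)
--     return scores
-- ===== Notes on version B (the rewrite author's own statement) =====
-- stated objective: alternative
-- what changed: Replaces Horner's left-to-right accumulate-and-multiply with a positional base-5 sum: iterate the reversed string keeping a running place-value weight (1, 5, 25, ...) and add score*weight.
import Mathlib
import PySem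

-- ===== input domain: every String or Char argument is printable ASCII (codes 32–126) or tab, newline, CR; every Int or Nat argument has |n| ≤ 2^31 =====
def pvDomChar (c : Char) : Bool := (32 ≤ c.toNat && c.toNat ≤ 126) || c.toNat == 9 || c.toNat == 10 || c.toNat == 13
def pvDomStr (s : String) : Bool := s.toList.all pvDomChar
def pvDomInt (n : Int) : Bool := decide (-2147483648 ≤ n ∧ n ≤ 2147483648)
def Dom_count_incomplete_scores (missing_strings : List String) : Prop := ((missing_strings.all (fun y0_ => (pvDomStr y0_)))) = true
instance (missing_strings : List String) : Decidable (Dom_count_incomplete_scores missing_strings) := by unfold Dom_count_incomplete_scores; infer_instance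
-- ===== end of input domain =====

-- ===== PORT A =====
-- B changes the decomposition: positional base-5 weighted sum over the reversed string instead of A's Horner accumulation (objective: alternative).
-- INCOMPLETE_SCORING lookup; Python raises KeyError for other chars (excluded by Pre_).
def incompleteScoring (c : Char) : Int :=
  if c = ')' then 1 else if c = ']' then 2 else if c = '}' then 3 else if c = '>' then 4 else 0

def count_incomplete_scores (missing_strings : List String) : List Int :=
  missing_strings.foldl (fun scores missing_string =>
    scores ++ [missing_string.toList.foldl (fun score c => score * 5 + incompleteScoring c) 0]) []

-- ===== PORT B =====
-- per string: fold over the reversed characters carrying (total, weight)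
def altStep (tw : Int × Int) (c : Char) : Int × Int :=
  (tw.1 + incompleteScoring c * tw.2, tw.2 * 5)

def count_incomplete_scores_alt (missing_strings : List String) : List Int :=
  missing_strings.foldl (fun scores missing_string =>
    scores ++ [(missing_string.toList.reverse.foldl altStep (0, 1)).1]) []

-- ===== PRECONDITION & SPEC =====
-- Pre_ excludes exactly the inputs where Python A raises KeyError: a character outside ")]}>"
def Pre_count_incomplete_scores (missing_strings : List String) : Prop :=
  (missing_strings.all (fun s => s.toList.all (fun c => c == ')' || c == ']' || c == '}' || c == '>'))) = true
instance (missing_strings : List String) : Decidable (Pre_count_incomplete_scores missing_strings) := by unfold Pre_count_incomplete_scores; infer_instance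
def pvWitness_count_incomplete_scores : List String := [")]", ""]
def Spec_count_incomplete_scores (missing_strings : List String) (out : List Int) : Prop := out = count_incomplete_scores_alt missing_strings
instance (missing_strings : List String) (out : List Int) : Decidable (Spec_count_incomplete_scores missing_strings out) := by unfold Spec_count_incomplete_scores; infer_instance

-- ===== CLAIM (what is proved, stated in full; the proofs are below) =====
def Claim_equal_count_incomplete_scores : Prop := ∀ (missing_strings : List String), Dom_count_incomplete_scores missing_strings → Pre_count_incomplete_scores missing_strings → Spec_count_incomplete_scores missing_strings (count_incomplete_scores missing_strings)

-- ===== LEMMAS AND PROOFS =====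

theorem foldl_snoc (f : String → Int) (l : List String) (acc : List Int) :
    l.foldl (fun scores s => scores ++ [f s]) acc = acc ++ l.map f := by
  induction l generalizing acc with
  | nil => simp
  | cons s l ih => simp [ih]

theorem altStep_foldl (r : List Char) (t w : Int) :
    r.foldl altStep (t, w) = (t + w * (r.foldl altStep (0, 1)).1, w * (r.foldl altStep (0, 1)).2) := by
  induction r generalizing t w with
  | nil => simp
  | cons c r ih =>
    simp only [List.foldl_cons, altStep]
    rw [ih, ih (0 + incompleteScoring c * 1)]
    simp only [Prod.mk.injEq]
    constructor <;> ring

theorem horner_eq (l : List Char) (a : Int) :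
    l.foldl (fun score c => score * 5 + incompleteScoring c) a
      = a * 5 ^ l.length + (l.reverse.foldl altStep (0, 1)).1 := by
  induction l generalizing a with
  | nil => simp
  | cons c l ih =>
    simp only [List.foldl_cons, List.reverse_cons, List.foldl_append, List.foldl_cons,
      List.foldl_nil, ih]
    rw [altStep_foldl]
    have hw : ∀ (r : List Char), (r.foldl altStep (0, 1)).2 = 5 ^ r.length := by
      intro r
      induction r with
      | nil => simp
      | cons d r ihr =>
        simp only [List.foldl_cons, altStep]
        rw [altStep_foldl]
        simp [ihr, pow_succ]; ring
    simp only [altStep, hw, List.length_reverse, List.length_cons]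
    ring

theorem per_string (s : String) :
    s.toList.foldl (fun score c => score * 5 + incompleteScoring c) 0
      = (s.toList.reverse.foldl altStep (0, 1)).1 := by
  rw [horner_eq]; ring

-- ===== VERDICT (by name: the statement is the Claim_ definition above) =====
theorem count_incomplete_scores_spec : Claim_equal_count_incomplete_scores := by
  intro ms _ _
  unfold Spec_count_incomplete_scores count_incomplete_scores count_incomplete_scores_alt
  rw [foldl_snoc, foldl_snoc]
  simp [per_string]
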